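-- pv_equiv track=rewrite | github.com/ravardh/GIETU_SuperCoderBatch1 | Day 21 [Test]/morning/kadane.py | count_pic
-- ===== SOURCE A (Python) =====
-- def count_pic(arr):
--   n = len(arr)
--   curr, ans = arr[0], 1
--   for i in range(1, n):
--     if arr[i] > curr:
--       ans += 1
--     curr = max(curr, arr[i])
--   return ans
-- ===== SOURCE B (Python) =====
-- def count_pic(arr):
--     seen = []
--     count = 0
--     for x in arr:
--         if all(p < x for p in seen):
--             count += 1
--         seen.append(x)
--     return count
-- ===== Notes on version B (the rewrite author's own statement) =====
-- stated objective: alternative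
-- what changed: Drops the running-maximum accumulator entirely: B keeps the list of all previously seen elements and counts an element as a record iff it exceeds every earlier element (brute-force all() check), trading O(n) for O(n^2).
import Mathlib
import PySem

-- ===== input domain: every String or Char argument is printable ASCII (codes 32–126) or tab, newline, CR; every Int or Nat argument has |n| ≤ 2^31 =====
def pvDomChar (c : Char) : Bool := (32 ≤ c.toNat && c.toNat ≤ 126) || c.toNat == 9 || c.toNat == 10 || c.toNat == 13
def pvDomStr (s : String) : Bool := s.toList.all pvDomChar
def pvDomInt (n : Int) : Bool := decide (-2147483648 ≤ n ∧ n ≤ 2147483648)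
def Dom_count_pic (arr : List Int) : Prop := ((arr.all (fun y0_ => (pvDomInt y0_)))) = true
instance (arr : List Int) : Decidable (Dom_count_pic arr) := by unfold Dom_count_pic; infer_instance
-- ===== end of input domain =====

-- B drops A's running-maximum accumulator: it keeps the list of all previously seen
-- elements and counts an element iff it exceeds every earlier element (brute-force check).

-- ===== PORT A =====
def count_pic (arr : List Int) : Int :=
  let n : Int := PySem.List.len arr
  let curr : Int := PySem.List.pyGetD arr 0 0       -- arr[0]; in range under Pre_
  let ans : Int := 1
  let st := (PySem.List.pyRange 1 n 1).foldl
    (fun (s : Int × Int) i =>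
      let v := PySem.List.pyGetD arr i 0            -- arr[i]; always in range here
      let ans' := if v > s.1 then s.2 + 1 else s.2
      (max s.1 v, ans'))
    (curr, ans)
  st.2

-- ===== PORT B =====
def count_pic_alt (arr : List Int) : Int :=
  (arr.foldl
    (fun (s : Int × List Int) x =>
      ((if s.2.all (fun p => p < x) then s.1 + 1 else s.1), s.2 ++ [x]))
    (0, [])).1

-- ===== PRECONDITION & SPEC =====
-- A raises IndexError on the empty list (arr[0]); Pre_ excludes exactly that input.
def Pre_count_pic (arr : List Int) : Prop := arr ≠ []
instance (arr : List Int) : Decidable (Pre_count_pic arr) := by unfold Pre_count_pic; infer_instance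
def pvWitness_count_pic : List Int := [3, 1, 4]

def Spec_count_pic (arr : List Int) (out : Int) : Prop := out = count_pic_alt arr
instance (arr : List Int) (out : Int) : Decidable (Spec_count_pic arr out) := by unfold Spec_count_pic; infer_instance

-- ===== CLAIM (what is proved, stated in full; the proofs are below) =====
def Claim_equal_count_pic : Prop := ∀ (arr : List Int), Dom_count_pic arr → Pre_count_pic arr → Spec_count_pic arr (count_pic arr)

-- ===== LEMMAS AND PROOFS =====

-- B's fold: the count component shifts additively with the initial count.
lemma alt_fold_shift (xs : List Int) (k : Int) (seen : List Int) :
    (xs.foldl (fun (s : Int × List Int) x =>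
        ((if s.2.all (fun p => p < x) then s.1 + 1 else s.1), s.2 ++ [x])) (k, seen)).1
    = k + (xs.foldl (fun (s : Int × List Int) x =>
        ((if s.2.all (fun p => p < x) then s.1 + 1 else s.1), s.2 ++ [x])) (0, seen)).1 := by
  induction xs generalizing k seen with
  | nil => simp
  | cons y ys ih =>
    simp only [List.foldl_cons]
    by_cases h : seen.all (fun p => decide (p < y))
    · simp only [h, if_pos]
      rw [ih (k+1), ih (0+1)]; ring
    · simp only [h]
      rw [if_neg (by simp), if_neg (by simp)]
      rw [ih k]

-- Core invariant: if testing "all seen < y" agrees with "c < y" for every y,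
-- then A's fused fold and B's history fold count the same records.
lemma key (xs : List Int) (c a : Int) (seen : List Int)
    (h : ∀ y : Int, (seen.all (fun p => decide (p < y))) = decide (c < y)) :
    (xs.foldl (fun (s : Int × Int) v =>
        (max s.1 v, if v > s.1 then s.2 + 1 else s.2)) (c, a)).2
    = a + (xs.foldl (fun (s : Int × List Int) x =>
        ((if s.2.all (fun p => p < x) then s.1 + 1 else s.1), s.2 ++ [x])) (0, seen)).1 := by
  induction xs generalizing c a seen with
  | nil => simp
  | cons y ys ih =>
    simp only [List.foldl_cons]
    have h' : ∀ z : Int, ((seen ++ [y]).all (fun p => decide (p < z))) = decide (max c y < z) := by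
      intro z
      simp only [List.all_append, h z, List.all_cons, List.all_nil, Bool.and_true]
      by_cases h1 : c < z <;> by_cases h2 : y < z <;>
        simp [h1, h2]
    rw [ih (max c y) _ (seen ++ [y]) h']
    by_cases hc : y > c
    · have hb : (seen.all (fun p => decide (p < y))) = true := by rw [h y]; simp [hc]
      rw [if_pos hc, if_pos hb]
      rw [alt_fold_shift ys (0+1)]
      ring
    · rw [if_neg hc, if_neg (by simp [h y]; omega)]

-- ===== VERDICT (by name: the statement is the Claim_ definition above) =====
theorem count_pic_spec : Claim_equal_count_pic := by
  intro arr _ hpre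
  unfold Spec_count_pic count_pic count_pic_alt
  match arr, hpre with
  | x :: xs, _ =>
    simp only [PySem.List.len_eq, PySem.List.pyGetD_zero_cons]
    rw [PySem.List.foldl_pyRange_pyGetD' (x :: xs) 0
        (fun (s : Int × Int) v => (max s.1 v, if v > s.1 then s.2 + 1 else s.2)) (x, 1)
        (a := 1) (by omega)]
    have hdrop : List.drop (Int.toNat 1) (x :: xs) = xs := by norm_num
    rw [hdrop]
    simp only [List.foldl_cons, List.all_nil, if_pos]
    rw [key xs x 1 [x] (by intro y; simp)]
    simp only [List.nil_append]
    rw [alt_fold_shift xs (0+1) [x]]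
    ring
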